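-- pv_equiv track=rewrite | github.com/wave-duality/stack-sort | stack sorting.py | dudu_equiv_cond
-- ===== SOURCE A (Python) =====
-- def dudu_equiv_cond(p):
--   #check if perm p has the equivalent to a dudu condition
--   #obv 123-avoiding, but also has 3 ltr mins such that first two are consec in value and second two in spacing
--   ltrs = []
--   curr_min = len(p)+1
--   for i in range(0, len(p)):
--     if p[i] < curr_min:
--       curr_min = p[i]
--       ltrs.append(i)
--   for j in range(0, len(ltrs)-2):
--     if p[ltrs[j+1]] == p[ltrs[j]]-1 and ltrs[j+2] == ltrs[j+1]+1:
--       return True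
--   return False
-- ===== SOURCE B (Python) =====
-- def dudu_equiv_cond(p):
--     # One streaming pass: keep the values of the last two left-to-right minima
--     # (va older, vb newer) and the index ib of the newest; when a third minimum
--     # appears, test the consecutive-value / consecutive-index condition directly.
--     curr_min = len(p) + 1
--     va = None  # value of the second-newest LTR minimum
--     vb = None  # value of the newest LTR minimum
--     ib = -1    # index of the newest LTR minimum
--     for i, x in enumerate(p):
--         if x < curr_min:
--             if va is not None and vb == va - 1 and i == ib + 1:
--                 return True
--             curr_min = x
--             va, vb, ib = vb, x, i
--     return False
-- ===== Notes on version B (the rewrite author's own statement) =====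
-- stated objective: alternative
-- what changed: B fuses A's two passes (build the list of left-to-right-minimum indices, then rescan it for a qualifying consecutive triple) into one streaming pass over enumerate(p) that keeps only O(1) state: the running minimum, the values of the last two minima and the index of the newest, testing the triple condition the moment a third minimum appears.
import Mathlib
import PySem

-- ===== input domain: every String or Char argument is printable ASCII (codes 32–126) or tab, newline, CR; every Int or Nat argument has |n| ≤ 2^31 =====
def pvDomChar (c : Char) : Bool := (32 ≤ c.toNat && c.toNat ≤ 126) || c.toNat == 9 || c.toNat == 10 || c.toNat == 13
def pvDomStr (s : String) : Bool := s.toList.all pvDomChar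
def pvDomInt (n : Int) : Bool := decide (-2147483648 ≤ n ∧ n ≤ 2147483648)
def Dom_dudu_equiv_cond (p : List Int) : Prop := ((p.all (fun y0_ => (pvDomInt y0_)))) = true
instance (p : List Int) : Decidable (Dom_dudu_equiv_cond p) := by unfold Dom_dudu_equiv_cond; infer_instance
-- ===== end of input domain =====

-- B fuses A's two passes into one streaming pass with O(1) state (same result, no ltrs list).

-- ===== PORT A =====
-- first loop of A: fold over range(0, len(p)) with state (curr_min, ltrs)
def duduStepA (p : List Int) (st : Int × List Int) (i : Int) : Int × List Int :=
  let v := PySem.List.pyGetD p i 0   -- p[i]; i always in range here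
  if v < st.1 then (v, st.2 ++ [i]) else st

def dudu_equiv_cond (p : List Int) : Bool :=
  let st := (PySem.List.pyRange 0 (p.length : Int) 1).foldl (duduStepA p) (((p.length : Int) + 1), [])
  let ltrs := st.2
  -- second loop: for j in range(0, len(ltrs)-2), return True on first hit
  (PySem.List.pyRange 0 ((ltrs.length : Int) - 2) 1).any (fun j =>
    (PySem.List.pyGetD p (PySem.List.pyGetD ltrs (j + 1) 0) 0
        == PySem.List.pyGetD p (PySem.List.pyGetD ltrs j 0) 0 - 1)
      && (PySem.List.pyGetD ltrs (j + 2) 0 == PySem.List.pyGetD ltrs (j + 1) 0 + 1))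

-- ===== PORT B =====
-- streaming loop over enumerate(p): state = curr_min, values va/vb of the last two
-- left-to-right minima (va older) and index ib of the newest
def duduLoopB : List (Int × Int) → Int → Option Int → Option Int → Int → Bool
  | [], _, _, _, _ => false
  | (i, x) :: r, m, va, vb, ib =>
    if x < m then
      if (match va, vb with
          | some a, some b => b == a - 1 && i == ib + 1
          | _, _ => false) then
        true
      else
        duduLoopB r x vb (some x) i
    else
      duduLoopB r m va vb ib

def dudu_equiv_cond_alt (p : List Int) : Bool :=
  duduLoopB (PySem.List.enumerate p 0) ((p.length : Int) + 1) none none (-1)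

-- ===== PRECONDITION & SPEC =====
def Spec_dudu_equiv_cond (p : List Int) (out : Bool) : Prop := out = dudu_equiv_cond_alt p
instance (p : List Int) (out : Bool) : Decidable (Spec_dudu_equiv_cond p out) := by unfold Spec_dudu_equiv_cond; infer_instance

-- ===== CLAIM (what is proved, stated in full; the proofs are below) =====
def Claim_equal_dudu_equiv_cond : Prop := ∀ (p : List Int), Dom_dudu_equiv_cond p → Spec_dudu_equiv_cond p (dudu_equiv_cond p)

-- ===== LEMMAS AND PROOFS =====

-- the left-to-right minima of xs (with indices starting at k, running minimum m), as (index, value) pairs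
def duduMins : List Int → Int → Int → List (Int × Int)
  | [], _, _ => []
  | x :: r, k, m => if x < m then (k, x) :: duduMins r (k + 1) x else duduMins r (k + 1) m

-- the final running minimum after scanning xs
def duduFMin : List Int → Int → Int
  | [], m => m
  | x :: r, m => if x < m then duduFMin r x else duduFMin r m

-- "some consecutive triple of minima satisfies the condition"
def duduTri : List (Int × Int) → Bool
  | (_, a) :: (ib, b) :: (ic, c) :: t => (b == a - 1 && ic == ib + 1) || duduTri ((ib, b) :: (ic, c) :: t)
  | _ => false

-- the body of A's second loop, as a function of the index list and a Nat index
def duduG (p L : List Int) (kk : Nat) : Bool :=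
  (PySem.List.pyGetD p (PySem.List.pyGetD L ((kk : Int) + 1) 0) 0
      == PySem.List.pyGetD p (PySem.List.pyGetD L (kk : Int) 0) 0 - 1)
    && (PySem.List.pyGetD L ((kk : Int) + 2) 0 == PySem.List.pyGetD L ((kk : Int) + 1) 0 + 1)

theorem duduTri_cons3 (ia a ib b ic c : Int) (t : List (Int × Int)) :
    duduTri ((ia, a) :: (ib, b) :: (ic, c) :: t)
      = ((b == a - 1 && ic == ib + 1) || duduTri ((ib, b) :: (ic, c) :: t)) := rfl

theorem duduTri_fst_irrel (i j a : Int) (t : List (Int × Int)) :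
    duduTri ((i, a) :: t) = duduTri ((j, a) :: t) := by
  match t with
  | [] => rfl
  | [_] => rfl
  | (ib, b) :: (ic, c) :: t' => rw [duduTri_cons3, duduTri_cons3]

theorem duduG_shift (p : List Int) (y : Int) (L : List Int) (kk : Nat) :
    duduG p (y :: L) (kk + 1) = duduG p L kk := by
  have econs : ∀ (i : Int), 0 ≤ i → PySem.List.pyGetD (y :: L) (i + 1) 0 = PySem.List.pyGetD L i 0 := by
    intro i hi
    obtain ⟨j, rfl⟩ := Int.eq_ofNat_of_zero_le hi
    have h : ((j : Int) + 1) = ((j + 1 : Nat) : Int) := by push_cast; ring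
    rw [h, PySem.List.pyGetD_natCast, PySem.List.pyGetD_natCast]
    simp [List.getD]
  unfold duduG
  have h1 : ((kk + 1 : Nat) : Int) = (kk : Int) + 1 := by push_cast; ring
  rw [h1]
  rw [show ((kk : Int) + 1 + 2) = ((kk : Int) + 2) + 1 from by ring]
  rw [econs ((kk : Int) + 2) (by positivity), econs ((kk : Int) + 1) (by positivity),
    econs (kk : Int) (by positivity)]

theorem duduMins_lookup (p : List Int) :
    ∀ (xs : List Int) (k : Nat) (m : Int), p.drop k = xs →
      ∀ pr ∈ duduMins xs (k : Int) m, PySem.List.pyGetD p pr.1 0 = pr.2 := by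
  intro xs
  induction xs with
  | nil => intro k m _ pr h; simp [duduMins] at h
  | cons x r ih =>
    intro k m hk pr hpr
    have hklt : k < p.length := by
      by_contra h
      rw [List.drop_eq_nil_of_le (by omega)] at hk
      exact absurd hk (by simp)
    have hx : p[k]? = some x := by
      rw [← List.head?_drop, hk]; rfl
    have hr : p.drop (k + 1) = r := by
      have := congrArg List.tail hk
      simpa [List.tail_drop] using this
    simp only [duduMins] at hpr
    by_cases hlt : x < m
    · simp only [hlt, if_pos, List.mem_cons] at hpr
      rcases hpr with h | h
      · subst h
        simp [PySem.List.pyGetD_natCast, List.getD, hx]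
      · exact ih (k + 1) x hr pr (by push_cast at h ⊢; exact_mod_cast h)
    · simp only [hlt, if_neg, not_false_iff] at hpr
      exact ih (k + 1) m hr pr (by push_cast at hpr ⊢; exact_mod_cast hpr)

-- A's first loop computes (final min, indices of the minima)
theorem duduFold_eq (p : List Int) :
    ∀ (xs : List Int) (k : Nat) (m : Int) (acc : List Int), p.drop k = xs →
      (PySem.List.pyRange (k : Int) (p.length : Int) 1).foldl (duduStepA p) (m, acc)
        = (duduFMin xs m, acc ++ (duduMins xs (k : Int) m).map (·.1)) := by
  intro xs
  induction xs with
  | nil =>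
    intro k m acc hk
    have hge : p.length ≤ k := by
      by_contra h
      have : p.drop k ≠ [] := by
        apply List.ne_nil_of_length_pos
        simp; omega
      exact this hk
    rw [PySem.List.pyRange_one_eq_nil (by exact_mod_cast hge)]
    simp [duduFMin, duduMins]
  | cons x r ih =>
    intro k m acc hk
    have hklt : k < p.length := by
      by_contra h
      rw [List.drop_eq_nil_of_le (by omega)] at hk
      exact absurd hk (by simp)
    have hx : p[k]? = some x := by
      rw [← List.head?_drop, hk]; rfl
    have hr : p.drop (k + 1) = r := by
      have := congrArg List.tail hk
      simpa [List.tail_drop] using this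
    rw [PySem.List.pyRange_one_cons (by exact_mod_cast hklt)]
    simp only [List.foldl_cons]
    have hstep : duduStepA p (m, acc) (k : Int)
        = if x < m then (x, acc ++ [(k : Int)]) else (m, acc) := by
      simp [duduStepA, PySem.List.pyGetD_natCast, List.getD, hx]
    rw [hstep]
    by_cases hlt : x < m
    · rw [if_pos hlt]
      have := ih (k + 1) x (acc ++ [(k : Int)]) hr
      push_cast at this ⊢
      rw [this]
      simp [duduMins, duduFMin, hlt]
    · rw [if_neg hlt]
      have := ih (k + 1) m acc hr
      push_cast at this ⊢
      rw [this]
      simp [duduMins, duduFMin, hlt]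

-- A's second loop, on the index list of minima whose values agree with p, is duduTri
theorem duduScan_eq (p : List Int) :
    ∀ (M : List (Int × Int)), (∀ pr ∈ M, PySem.List.pyGetD p pr.1 0 = pr.2) →
      (List.range (M.length - 2)).any (duduG p (M.map (·.1))) = duduTri M := by
  intro M
  induction M with
  | nil => intro _; simp [duduTri]
  | cons a M' ih =>
    intro hlk
    match M', ih with
    | [], _ => simp [duduTri]
    | [b], _ => simp [duduTri]
    | (ib, vb) :: (ic, vc) :: t, ih =>
      have hlk' : ∀ pr ∈ (ib, vb) :: (ic, vc) :: t, PySem.List.pyGetD p pr.1 0 = pr.2 := by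
        intro pr h; exact hlk pr (List.mem_cons_of_mem _ h)
      have ha := hlk a (by simp)
      have hb := hlk (ib, vb) (by simp)
      have hlen : (a :: (ib, vb) :: (ic, vc) :: t).length - 2 = t.length + 1 := by simp
      rw [hlen, List.range_succ_eq_map, List.any_cons, List.any_map]
      have htail : (List.range t.length).any (duduG p ((a :: (ib, vb) :: (ic, vc) :: t).map (·.1)) ∘ Nat.succ)
          = (List.range t.length).any (duduG p (((ib, vb) :: (ic, vc) :: t).map (·.1))) := by
        apply List.any_congr rfl
        intro kk
        show duduG p (a.1 :: ((ib, vb) :: (ic, vc) :: t).map (·.1)) (kk + 1) = _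
        rw [duduG_shift]
      have ih2 := ih hlk'
      have hl2 : ((ib, vb) :: (ic, vc) :: t).length - 2 = t.length := by simp
      rw [hl2] at ih2
      rw [htail, ih2]
      have hhead : duduG p ((a :: (ib, vb) :: (ic, vc) :: t).map (·.1)) 0
          = (vb == a.2 - 1 && ic == ib + 1) := by
        unfold duduG
        have g0 : PySem.List.pyGetD ((a :: (ib, vb) :: (ic, vc) :: t).map (·.1)) ((0 : Nat) : Int) 0 = a.1 := by
          rw [PySem.List.pyGetD_natCast]; simp [List.getD]
        have g1 : PySem.List.pyGetD ((a :: (ib, vb) :: (ic, vc) :: t).map (·.1)) (((0 : Nat) : Int) + 1) 0 = ib := by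
          have h : (((0 : Nat) : Int) + 1) = ((1 : Nat) : Int) := by omega
          rw [h, PySem.List.pyGetD_natCast]; simp [List.getD]
        have g2 : PySem.List.pyGetD ((a :: (ib, vb) :: (ic, vc) :: t).map (·.1)) (((0 : Nat) : Int) + 2) 0 = ic := by
          have h : (((0 : Nat) : Int) + 2) = ((2 : Nat) : Int) := by omega
          rw [h, PySem.List.pyGetD_natCast]; simp [List.getD]
        rw [g0, g1, g2, ha, hb]
      rw [hhead]
      obtain ⟨ia, va⟩ := a
      rw [duduTri_cons3]

-- encode B's window state as the (≤ 2)-element prefix of minima it stands for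
def duduWnd : Option Int → Option Int → Int → List (Int × Int)
  | some a, some b, ib => [(0, a), (ib, b)]
  | none, some b, ib => [(ib, b)]
  | _, _, _ => []

-- B's streaming loop equals duduTri of window ++ remaining minima
theorem duduLoopB_eq :
    ∀ (xs : List Int) (k m : Int) (va vb : Option Int) (ib : Int),
      duduLoopB (PySem.List.enumerate xs k) m va vb ib
        = duduTri (duduWnd va vb ib ++ duduMins xs k m) := by
  intro xs
  induction xs with
  | nil =>
    intro k m va vb ib
    match va, vb with
    | some a, some b => simp [PySem.List.enumerate_nil, duduLoopB, duduMins, duduWnd, duduTri]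
    | some a, none => simp [PySem.List.enumerate_nil, duduLoopB, duduMins, duduWnd, duduTri]
    | none, some b => simp [PySem.List.enumerate_nil, duduLoopB, duduMins, duduWnd, duduTri]
    | none, none => simp [PySem.List.enumerate_nil, duduLoopB, duduMins, duduWnd, duduTri]
  | cons x r ih =>
    intro k m va vb ib
    rw [PySem.List.enumerate_cons]
    simp only [duduLoopB, duduMins]
    by_cases hlt : x < m
    · simp only [if_pos hlt]
      match va, vb with
      | some a, some b =>
        simp only [duduWnd, List.cons_append, List.nil_append, duduTri_cons3]
        by_cases hc : (b == a - 1 && k == ib + 1) = true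
        · simp [hc]
        · simp only [hc, Bool.false_eq_true, if_false, ih]
          simp only [duduWnd, List.cons_append, List.nil_append]
          rw [duduTri_fst_irrel 0 ib b, Bool.false_or]
      | some a, none =>
        simp only [Bool.false_eq_true, if_false, ih]
        simp [duduWnd]
      | none, some b =>
        simp only [Bool.false_eq_true, if_false, ih]
        simp only [duduWnd, List.cons_append, List.nil_append]
        rw [duduTri_fst_irrel 0 ib b]
      | none, none =>
        simp only [Bool.false_eq_true, if_false, ih]
        simp [duduWnd]
    · simp only [if_neg hlt, ih]

-- the pyRange-any of A's second loop as a List.range-any of duduG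
theorem duduRange_any (p L : List Int) :
    (PySem.List.pyRange 0 ((L.length : Int) - 2) 1).any (fun j =>
      (PySem.List.pyGetD p (PySem.List.pyGetD L (j + 1) 0) 0
          == PySem.List.pyGetD p (PySem.List.pyGetD L j 0) 0 - 1)
        && (PySem.List.pyGetD L (j + 2) 0 == PySem.List.pyGetD L (j + 1) 0 + 1))
      = (List.range (L.length - 2)).any (duduG p L) := by
  rw [PySem.List.pyRange_one]
  have h : (((L.length : Int) - 2) - 0).toNat = L.length - 2 := by omega
  rw [h, List.any_map]
  apply List.any_congr rfl
  intro kk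
  simp only [Function.comp, duduG]
  norm_num

-- ===== VERDICT (by name: the statement is the Claim_ definition above) =====
theorem dudu_equiv_cond_spec : Claim_equal_dudu_equiv_cond := by
  intro p _
  unfold Spec_dudu_equiv_cond dudu_equiv_cond dudu_equiv_cond_alt
  have hfold := duduFold_eq p p 0 ((p.length : Int) + 1) [] (by simp)
  push_cast at hfold
  rw [hfold]
  simp only [List.nil_append]
  have hlk : ∀ pr ∈ duduMins p 0 ((p.length : Int) + 1), PySem.List.pyGetD p pr.1 0 = pr.2 := by
    intro pr h
    exact duduMins_lookup p p 0 ((p.length : Int) + 1) (by simp) pr (by exact_mod_cast h)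
  have hlen : ((duduMins p 0 ((p.length : Int) + 1)).map (·.1)).length
      = (duduMins p 0 ((p.length : Int) + 1)).length := by simp
  rw [duduRange_any p, hlen, duduScan_eq p _ hlk,
    duduLoopB_eq p 0 ((p.length : Int) + 1) none none (-1)]
  simp [duduWnd]
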